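-- pv_equiv track=rewrite | github.com/Shinyanogit/procon | unsolved/100問/question17/solveagain.py | check
-- ===== SOURCE A (Python) =====
-- def check(queens):  # 斜めの効きを一方向について検討
--     distance_list = []
--     for i, j in enumerate(queens):
--         if i + j not in distance_list:
--             distance_list.append(i + j)
--         else:
--             return False
--     return True
-- ===== SOURCE B (Python) =====
-- def check(queens):  # sort the diagonal sums, then verify no two adjacent equal
--     sums = sorted(i + j for i, j in enumerate(queens))
--     return all(x != y for x, y in zip(sums, sums[1:]))
-- ===== Notes on version B (the rewrite author's own statement) =====
-- stated objective: faster
-- what changed: A scans a growing list for membership on each queen with an early return; B sorts all diagonal sums once and checks that no two adjacent entries are equal.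
import Mathlib
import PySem

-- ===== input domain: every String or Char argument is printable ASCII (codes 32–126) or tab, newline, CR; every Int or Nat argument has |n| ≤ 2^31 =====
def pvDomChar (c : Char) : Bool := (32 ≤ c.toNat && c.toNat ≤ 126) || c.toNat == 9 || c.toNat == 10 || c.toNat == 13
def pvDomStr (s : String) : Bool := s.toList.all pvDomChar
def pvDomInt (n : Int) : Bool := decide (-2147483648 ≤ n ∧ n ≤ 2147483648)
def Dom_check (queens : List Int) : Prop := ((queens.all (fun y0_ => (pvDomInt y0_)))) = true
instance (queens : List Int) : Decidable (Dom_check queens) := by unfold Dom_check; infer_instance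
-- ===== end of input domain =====

-- B sorts the diagonal sums once and checks adjacent entries differ, instead of A's
-- growing-list membership scan with early return (objective: faster, O(n log n) sort vs O(n^2) membership scans).


-- ===== PORT A =====
-- the for-loop over enumerate(queens) carrying distance_list, with early return False
def checkLoop : List (Int × Int) → List Int → Bool
  | [], _ => true
  | (i, j) :: rest, dl =>
      if !(dl.contains (i + j)) then checkLoop rest (dl ++ [i + j])
      else false

def check (queens : List Int) : Bool :=
  checkLoop (PySem.List.enumerate queens 0) []

-- ===== PORT B =====
-- sums[1:] on a list is List.drop 1 (exact: start index 1 ≥ 0, no stop/step)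
def check_alt (queens : List Int) : Bool :=
  let sums := PySem.List.sorted ((PySem.List.enumerate queens 0).map (fun p => p.1 + p.2)) (fun x => x) false
  (sums.zip (sums.drop 1)).all (fun p => p.1 != p.2)

-- ===== PRECONDITION & SPEC =====
def Spec_check (queens : List Int) (out : Bool) : Prop := out = check_alt queens
instance (queens : List Int) (out : Bool) : Decidable (Spec_check queens out) := by unfold Spec_check; infer_instance

-- ===== CLAIM (what is proved, stated in full; the proofs are below) =====
def Claim_equal_check : Prop := ∀ (queens : List Int), Dom_check queens → Spec_check queens (check queens)

-- ===== LEMMAS AND PROOFS =====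

-- A's loop returns true iff the accumulated list stays duplicate-free
theorem checkLoop_eq_nodup (pairs : List (Int × Int)) (dl : List Int) (h : dl.Nodup) :
    checkLoop pairs dl = decide (dl ++ pairs.map (fun p => p.1 + p.2)).Nodup := by
  induction pairs generalizing dl with
  | nil => simp [checkLoop, h]
  | cons p rest ih =>
      obtain ⟨i, j⟩ := p
      by_cases hm : (i + j) ∈ dl
      · have : dl.contains (i + j) = true := by simpa using hm
        simp only [checkLoop, this]
        have hnd : ¬ (dl ++ (i + j) :: rest.map (fun p => p.1 + p.2)).Nodup := fun hn =>
          (List.disjoint_of_nodup_append hn) hm (List.mem_cons_self ..)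
        simp [hnd]
      · have hc : dl.contains (i + j) = false := by simpa using hm
        simp only [checkLoop, hc]
        have h' : (dl ++ [i + j]).Nodup := by
          simp [List.nodup_append, h]
          intro a ha hae
          exact hm (hae ▸ ha)
        rw [ih (dl ++ [i + j]) h']
        simp [List.append_assoc]

-- adjacent-distinct on a ≤-sorted list decides Nodup
theorem adj_all_eq_nodup (s : List Int) (hs : s.Pairwise (· ≤ ·)) :
    (s.zip (s.drop 1)).all (fun p => p.1 != p.2) = decide s.Nodup := by
  induction s with
  | nil => simp
  | cons a t ih =>
      cases t with
      | nil => simp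
      | cons b t' =>
          have hpt : (b :: t').Pairwise (· ≤ ·) := hs.tail
          have hab : a ≤ b := (List.pairwise_cons.mp hs).1 b (List.mem_cons_self ..)
          have hrest := ih hpt
          by_cases heq : a = b
          · subst heq
            simp [List.zip]
          · have hane : (a != b) = true := by simpa using heq
            have hlt : a < b := lt_of_le_of_ne hab heq
            have hnotmem : a ∉ b :: t' := by
              intro hmem
              rcases List.mem_cons.mp hmem with h1 | h2
              · exact heq h1
              · have : b ≤ a := (List.pairwise_cons.mp hpt).1 a h2
                omega
            have : ((a :: b :: t').zip ((a :: b :: t').drop 1)).all (fun p => p.1 != p.2)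
                 = ((b :: t').zip ((b :: t').drop 1)).all (fun p => p.1 != p.2) := by
              simp [hane]
            rw [this, hrest]
            by_cases hnd : (b :: t').Nodup
            · simp [List.nodup_cons, hnotmem, hnd]
            · simp [List.nodup_cons, hnd]

-- ===== VERDICT (by name: the statement is the Claim_ definition above) =====
theorem check_spec : Claim_equal_check := by
  intro queens _
  unfold Spec_check check check_alt
  set L := (PySem.List.enumerate queens 0).map (fun p => p.1 + p.2) with hL
  have hA : checkLoop (PySem.List.enumerate queens 0) [] = decide L.Nodup := by
    simpa using checkLoop_eq_nodup (PySem.List.enumerate queens 0) [] List.nodup_nil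
  have hperm : (PySem.List.sorted L (fun x => x) false).Perm L := PySem.List.sorted_perm ..
  have hpw : (PySem.List.sorted L (fun x => x) false).Pairwise (· ≤ ·) := by
    simpa using PySem.List.sorted_pairwise L (fun x => x)
  have hB := adj_all_eq_nodup _ hpw
  rw [hA]
  simp only [hB]
  simp [hperm.nodup_iff]
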